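-- pv_equiv track=rewrite | github.com/Jonathan-Vandenberg/speech-analysis | main/backend/analyzers/pronunciation.py | _are_phonetically_similar
-- ===== SOURCE A (Python) =====
-- def _are_phonetically_similar(char1: str, char2: str) -> bool:
--     """Check if two characters represent phonetically similar sounds"""
--     similar_groups = [
--         ['b', 'p'],      # Voiced/voiceless pairs
--         ['d', 't'],
--         ['g', 'k'],
--         ['v', 'f'],
--         ['z', 's'],
--         ['th', 'f', 's'], # TH substitutions
--         ['r', 'l', 'w'],  # Liquid consonants
--         ['a', 'e', 'i'],  # Close vowels
--         ['o', 'u'],       # Back vowels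
--     ]
--
--     for group in similar_groups:
--         if char1 in group and char2 in group:
--             return True
--
--     return False
-- ===== SOURCE B (Python) =====
-- # Inverted index built once: token -> set of indices of the groups that contain it.
-- _GROUP_INDEX = {}
-- for _i, _group in enumerate((
--     ('b', 'p'), ('d', 't'), ('g', 'k'), ('v', 'f'), ('z', 's'),
--     ('th', 'f', 's'), ('r', 'l', 'w'), ('a', 'e', 'i'), ('o', 'u'),
-- )):
--     for _tok in _group:
--         _GROUP_INDEX[_tok] = _GROUP_INDEX.get(_tok, set()) | {_i}
--
--
-- def _are_phonetically_similar(char1: str, char2: str) -> bool: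
--     """Check if two characters represent phonetically similar sounds"""
--     empty = set()
--     groups1 = _GROUP_INDEX.get(char1, empty)
--     groups2 = _GROUP_INDEX.get(char2, empty)
--     return not groups1.isdisjoint(groups2)
-- ===== Notes on version B (the rewrite author's own statement) =====
-- stated objective: idiomatic
-- what changed: Instead of scanning every similarity group per call, B precomputes once an inverted index mapping each token to the set of group indices containing it, and answers with two dict lookups and a set-disjointness test.
import Mathlib
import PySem

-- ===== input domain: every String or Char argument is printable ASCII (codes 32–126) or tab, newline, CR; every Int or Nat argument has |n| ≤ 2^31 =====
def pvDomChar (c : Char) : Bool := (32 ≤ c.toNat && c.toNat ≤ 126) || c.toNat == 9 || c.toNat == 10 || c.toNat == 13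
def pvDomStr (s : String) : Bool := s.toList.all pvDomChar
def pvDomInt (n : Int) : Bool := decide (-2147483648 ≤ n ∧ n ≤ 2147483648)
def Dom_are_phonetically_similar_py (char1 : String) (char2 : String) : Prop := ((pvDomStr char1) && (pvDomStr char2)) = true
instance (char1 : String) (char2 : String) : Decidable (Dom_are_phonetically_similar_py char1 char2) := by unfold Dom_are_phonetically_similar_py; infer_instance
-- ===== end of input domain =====

-- B replaces A's scan over all groups by an inverted index (token -> set of group ids) built
-- once, answering with two dict lookups and a set-disjointness test (objective: idiomatic).

-- ===== PORT A =====
def simGroups : List (List String) :=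
  [["b", "p"], ["d", "t"], ["g", "k"], ["v", "f"], ["z", "s"],
   ["th", "f", "s"], ["r", "l", "w"], ["a", "e", "i"], ["o", "u"]]

-- A's 'for group in similar_groups: if char1 in group and char2 in group: return True' loop
def apsLoop (char1 : String) (char2 : String) : List (List String) → Bool
  | [] => false
  | g :: rest => if g.contains char1 && g.contains char2 then true else apsLoop char1 char2 rest

def are_phonetically_similar_py (char1 : String) (char2 : String) : Bool :=
  apsLoop char1 char2 simGroups

-- ===== PORT B =====
def simGroupsAlt : List (List String) :=
  [["b", "p"], ["d", "t"], ["g", "k"], ["v", "f"], ["z", "s"],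
   ["th", "f", "s"], ["r", "l", "w"], ["a", "e", "i"], ["o", "u"]]

-- Source B's module-level build: for i, group in enumerate(...): for tok in group: idx[tok] = idx.get(tok, set()) | {i}
def groupIndex : PySem.Dict String (PySem.Set Int) :=
  (PySem.List.enumerate simGroupsAlt 0).foldl
    (fun d p => p.2.foldl
      (fun d tok => d.insert tok (PySem.Set.union (d.getD tok PySem.Set.empty) (PySem.Set.ofList [p.1]))) d)
    PySem.Dict.empty

def are_phonetically_similar_py_alt (char1 : String) (char2 : String) : Bool :=
  let empty : PySem.Set Int := PySem.Set.empty
  let groups1 := groupIndex.getD char1 empty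
  let groups2 := groupIndex.getD char2 empty
  !(PySem.Set.isdisjoint groups1 groups2)

-- ===== PRECONDITION & SPEC =====
def Spec_are_phonetically_similar_py (char1 : String) (char2 : String) (out : Bool) : Prop := out = are_phonetically_similar_py_alt char1 char2
instance (char1 : String) (char2 : String) (out : Bool) : Decidable (Spec_are_phonetically_similar_py char1 char2 out) := by unfold Spec_are_phonetically_similar_py; infer_instance

-- ===== CLAIM (what is proved, stated in full; the proofs are below) =====
def Claim_equal_are_phonetically_similar_py : Prop := ∀ (char1 : String) (char2 : String), Dom_are_phonetically_similar_py char1 char2 → Spec_are_phonetically_similar_py char1 char2 (are_phonetically_similar_py char1 char2)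

-- ===== LEMMAS AND PROOFS =====

-- the built index, as a literal association list
theorem groupIndex_eq : groupIndex = PySem.Dict.mk
    [("b", [0]), ("p", [0]), ("d", [1]), ("t", [1]), ("g", [2]), ("k", [2]),
     ("v", [3]), ("f", [3, 5]), ("z", [4]), ("s", [4, 5]), ("th", [5]),
     ("r", [6]), ("l", [6]), ("w", [6]), ("a", [7]), ("e", [7]), ("i", [7]),
     ("o", [8]), ("u", [8])] := by rfl

-- the tokens occurring in any group (= the keys of groupIndex)
def toks : List String :=
  ["b", "p", "d", "t", "g", "k", "v", "f", "z", "s", "th", "r", "l", "w", "a", "e", "i", "o", "u"]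

theorem alt_left (c1 c2 : String) (h : c1 ∉ toks) : are_phonetically_similar_py_alt c1 c2 = false := by
  have hn : groupIndex.get? c1 = none := by
    rw [groupIndex_eq, PySem.Dict.get?_eq_none_iff_not_mem_keys]
    simpa [toks] using h
  simp [are_phonetically_similar_py_alt, PySem.Dict.getD_of_get?_eq_none _ _ hn,
    PySem.Set.isdisjoint, PySem.Set.empty]

theorem alt_right (c1 c2 : String) (h : c2 ∉ toks) : are_phonetically_similar_py_alt c1 c2 = false := by
  have hn : groupIndex.get? c2 = none := by
    rw [groupIndex_eq, PySem.Dict.get?_eq_none_iff_not_mem_keys]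
    simpa [toks] using h
  simp [are_phonetically_similar_py_alt, PySem.Dict.getD_of_get?_eq_none _ _ hn,
    PySem.Set.isdisjoint, PySem.Set.empty, PySem.Set.contains]

theorem a_left (c1 c2 : String) (h : c1 ∉ toks) : are_phonetically_similar_py c1 c2 = false := by
  simp only [toks, List.mem_cons, List.not_mem_nil, or_false, not_or] at h
  obtain ⟨h1, h2, h3, h4, h5, h6, h7, h8, h9, h10, h11, h12, h13, h14, h15, h16, h17, h18, h19⟩ := h
  simp [are_phonetically_similar_py, simGroups, apsLoop, List.contains_eq_mem,
    h1, h2, h3, h4, h5, h6, h7, h8, h9, h10, h11, h12, h13, h14, h15, h16, h17, h18, h19]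

theorem a_right (c1 c2 : String) (h : c2 ∉ toks) : are_phonetically_similar_py c1 c2 = false := by
  simp only [toks, List.mem_cons, List.not_mem_nil, or_false, not_or] at h
  obtain ⟨h1, h2, h3, h4, h5, h6, h7, h8, h9, h10, h11, h12, h13, h14, h15, h16, h17, h18, h19⟩ := h
  simp [are_phonetically_similar_py, simGroups, apsLoop, List.contains_eq_mem,
    h1, h2, h3, h4, h5, h6, h7, h8, h9, h10, h11, h12, h13, h14, h15, h16, h17, h18, h19]

set_option maxHeartbeats 2000000 in
theorem main_in (c1 c2 : String) (h1 : c1 ∈ toks) (h2 : c2 ∈ toks) :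
    are_phonetically_similar_py c1 c2 = are_phonetically_similar_py_alt c1 c2 := by
  simp only [toks, List.mem_cons, List.not_mem_nil, or_false] at h1 h2
  rcases h1 with rfl|rfl|rfl|rfl|rfl|rfl|rfl|rfl|rfl|rfl|rfl|rfl|rfl|rfl|rfl|rfl|rfl|rfl|rfl <;>
  rcases h2 with rfl|rfl|rfl|rfl|rfl|rfl|rfl|rfl|rfl|rfl|rfl|rfl|rfl|rfl|rfl|rfl|rfl|rfl|rfl <;>
  decide

-- ===== VERDICT (by name: the statement is the Claim_ definition above) =====
theorem are_phonetically_similar_py_spec : Claim_equal_are_phonetically_similar_py := by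
  intro c1 c2 _
  unfold Spec_are_phonetically_similar_py
  by_cases h1 : c1 ∈ toks
  · by_cases h2 : c2 ∈ toks
    · exact main_in c1 c2 h1 h2
    · rw [a_right c1 c2 h2, alt_right c1 c2 h2]
  · rw [a_left c1 c2 h1, alt_left c1 c2 h1]
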